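-- pv_equiv track=rewrite | github.com/norbert-acedanski/ciphers | ciphers.py | rail_fence_cipher_decoding
-- ===== SOURCE A (Python) =====
-- def rail_fence_cipher_decoding(text: str, number_of_rails: int) -> str:
--     """ Rail-fence cipher function for decoding.\n
--     Decoding reverses the procedures from encoding function.\n
--     See reference [9] from README file for more information about the cipher.
--
--     :param text: Message to be decoded. Can contain non-letter characters like numbers, punctuation marks, etc.
--     :param number_of_rails: Specifies the number of rails (rows), to which the message was split.
--     :return: Deciphered message.
--     """
--     if number_of_rails < 2:
--         raise ValueError("Number of rails should be at least 2!")
--     text = text.upper()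
--     lists_of_text = [["" for _ in range(len(text))] for __ in range(number_of_rails)]
--     text_index, last_text_index = 0, 0
--     indexes_list = [[2*(number_of_rails - i - 1), 2*i] for i in range(number_of_rails)]
--     for list_index in range(number_of_rails):
--         inlist_index = list_index
--         # if indexes_list[list_index][0] == 0:
--         #     indexes_list_index = 1
--         # elif indexes_list[list_index][1] == 0:
--         #     indexes_list_index = 0
--         # Line below is not the same, yet more elegant and works as it should
--         indexes_list_index = 1 if indexes_list[list_index][0] == 0 else 0
--         while inlist_index < len(text):
--             lists_of_text[list_index][inlist_index] = text[text_index]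
--             if indexes_list[list_index][0] != 0 and indexes_list[list_index][1]:
--                 indexes_list_index = (text_index - last_text_index) % 2
--             inlist_index += indexes_list[list_index][indexes_list_index]
--             text_index += 1
--         last_text_index = text_index
--     processed_text = ""
--     for letter_index in range(len(text)):
--         for list_index in range(number_of_rails):
--             processed_text += lists_of_text[list_index][letter_index]
--     return processed_text
-- ===== SOURCE B (Python) =====
-- def rail_fence_cipher_decoding(text: str, number_of_rails: int) -> str:
--     """Rail-fence decode: closed-form zigzag pattern + per-rail slices, woven back in one pass (O(n))."""
--     if number_of_rails < 2:
--         raise ValueError("Number of rails should be at least 2!")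
--     text = text.upper()
--     n = len(text)
--     cycle = 2 * (number_of_rails - 1)
--     pattern = [min(p % cycle, cycle - p % cycle) for p in range(n)]
--     counts = [0] * number_of_rails
--     for r in pattern:
--         counts[r] += 1
--     rails = []
--     pos = 0
--     for cnt in counts:
--         rails.append(text[pos:pos + cnt])
--         pos += cnt
--     idx = [0] * number_of_rails
--     out = []
--     for r in pattern:
--         out.append(rails[r][idx[r]])
--         idx[r] += 1
--     return "".join(out)
-- ===== Notes on version B (the rewrite author's own statement) =====
-- stated objective: faster
-- what changed: Replaces A's per-rail zigzag stepping into an n-by-rails grid of cells plus a nested rails*n gather pass by a closed-form zigzag rail pattern, per-rail counts, text slicing, and a single weave pass.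
import Mathlib
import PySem

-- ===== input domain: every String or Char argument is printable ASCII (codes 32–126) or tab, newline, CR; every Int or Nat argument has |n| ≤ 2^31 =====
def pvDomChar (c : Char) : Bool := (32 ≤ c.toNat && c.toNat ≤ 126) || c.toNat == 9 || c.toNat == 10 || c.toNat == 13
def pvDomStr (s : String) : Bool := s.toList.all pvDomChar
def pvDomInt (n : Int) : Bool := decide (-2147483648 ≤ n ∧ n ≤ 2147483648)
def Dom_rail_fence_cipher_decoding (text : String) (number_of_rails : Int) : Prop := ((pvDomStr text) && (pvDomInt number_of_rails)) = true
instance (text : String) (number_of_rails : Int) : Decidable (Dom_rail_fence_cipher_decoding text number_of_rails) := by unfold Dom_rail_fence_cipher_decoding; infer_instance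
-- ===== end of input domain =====

-- B replaces A's per-rail zigzag scatter into a rails×n grid plus a rails*n gather pass by a
-- closed-form zigzag pattern, per-rail counts, slicing and one weave pass (objective: faster).
-- Python strings/cells are modelled as List Char; A raises ValueError for number_of_rails < 2 (excluded by Pre_).

-- ===== PORT A =====
-- the inner `while inlist_index < len(text)` loop of A for one rail; fuel-based (fuel n+1 is
-- enough: for number_of_rails ≥ 2 every step increases inlist_index by at least 1).
-- `text[text_index]` is ported as getD: for number_of_rails ≥ 2 the index is always in range.
def pvA_while (tc : List Char) (n s0 s1 : Nat) :
    Nat → List (List Char) → Nat → Nat → Nat → Nat → (List (List Char) × Nat)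
  | 0, row, _, ti, _, _ => (row, ti)
  | fuel+1, row, inlist, ti, last, ili =>
    if inlist < n then
      let row' := row.set inlist [tc.getD ti ' ']
      let ili' := if s0 ≠ 0 ∧ s1 ≠ 0 then (ti - last) % 2 else ili
      pvA_while tc n s0 s1 fuel row' (inlist + (if ili' = 0 then s0 else s1)) (ti+1) last ili'
    else (row, ti)

-- the `for list_index in range(number_of_rails)` loop: state (lists_of_text, text_index, last_text_index)
def pvA_rails (tc : List Char) (n R : Nat) : List (List (List Char)) × Nat × Nat :=
  (List.range R).foldl
    (fun st r =>
      let s0 := 2 * (R - r - 1)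
      let s1 := 2 * r
      let ili := if s0 = 0 then 1 else 0
      let res := pvA_while tc n s0 s1 (n+1) (st.1.getD r []) r st.2.1 st.2.2 ili
      (st.1.set r res.1, res.2, res.2))
    (List.replicate R (List.replicate n []), 0, 0)

def rail_fence_cipher_decoding (text : String) (number_of_rails : Int) : String :=
  if number_of_rails < 2 then "" -- Python raises ValueError here; excluded by Pre_
  else
    let tc := PySem.Chars.upper text.toList
    let n := tc.length
    let R := number_of_rails.toNat
    let grid := (pvA_rails tc n R).1
    -- the final nested gather loop: processed_text += lists_of_text[list_index][letter_index]
    String.mk ((List.range n).foldl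
      (fun acc p => (List.range R).foldl
        (fun acc2 r => acc2 ++ ((grid.getD r []).getD p [])) acc) [])

-- ===== PORT B =====
def rail_fence_cipher_decoding_alt (text : String) (number_of_rails : Int) : String :=
  if number_of_rails < 2 then "" -- Source B raises ValueError here; excluded by Pre_
  else
    let tc := PySem.Chars.upper text.toList
    let n := tc.length
    let R := number_of_rails.toNat
    let cycle := 2 * (R - 1)
    let pattern := (List.range n).map (fun p => min (p % cycle) (cycle - p % cycle))
    let counts := pattern.foldl (fun cs r => cs.set r (cs.getD r 0 + 1)) (List.replicate R 0)
    let rails := (counts.foldl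
      (fun (st : List (List Char) × Nat) cnt => (st.1 ++ [(tc.drop st.2).take cnt], st.2 + cnt))
      ([], 0)).1
    -- rails[r][idx[r]] is in range for number_of_rails ≥ 2; ported as getD
    String.mk ((pattern.foldl
      (fun (st : List Nat × List Char) r =>
        (st.1.set r (st.1.getD r 0 + 1), st.2 ++ [(rails.getD r []).getD (st.1.getD r 0) ' ']))
      (List.replicate R 0, [])).2)

-- ===== PRECONDITION & SPEC =====
-- Pre_ excludes exactly number_of_rails < 2, on which Python A raises ValueError.
def Pre_rail_fence_cipher_decoding (text : String) (number_of_rails : Int) : Prop :=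
  2 ≤ number_of_rails
instance (text : String) (number_of_rails : Int) : Decidable (Pre_rail_fence_cipher_decoding text number_of_rails) := by unfold Pre_rail_fence_cipher_decoding; infer_instance
def pvWitness_rail_fence_cipher_decoding : String × Int := ("WECRLTEERDSOEEFEAOCAIVDEN", 3)

def Spec_rail_fence_cipher_decoding (text : String) (number_of_rails : Int) (out : String) : Prop := out = rail_fence_cipher_decoding_alt text number_of_rails
instance (text : String) (number_of_rails : Int) (out : String) : Decidable (Spec_rail_fence_cipher_decoding text number_of_rails out) := by unfold Spec_rail_fence_cipher_decoding; infer_instance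

-- ===== CLAIM (what is proved, stated in full; the proofs are below) =====
def Claim_equal_rail_fence_cipher_decoding : Prop := ∀ (text : String) (number_of_rails : Int), Dom_rail_fence_cipher_decoding text number_of_rails → Pre_rail_fence_cipher_decoding text number_of_rails → Spec_rail_fence_cipher_decoding text number_of_rails (rail_fence_cipher_decoding text number_of_rails)

-- ===== LEMMAS AND PROOFS =====

-- rail index of column p in the zigzag of cycle 2*(R-1)
def zrail (R p : Nat) : Nat := min (p % (2*(R-1))) (2*(R-1) - p % (2*(R-1)))

-- the k-th column visited by A's while loop for rail r
def zpos (R r k : Nat) : Nat :=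
  if r = 0 then k * (2*(R-1))
  else if r = R - 1 then r + k * (2*(R-1))
  else (k/2) * (2*(R-1)) + (if k % 2 = 0 then r else 2*(R-1) - r)

def zF (R n r : Nat) : List Nat := (List.range n).filter (fun p => zrail R p = r)
def zK (R n r : Nat) : Nat := (zF R n r).length
def zoff (R n r : Nat) : Nat := ((List.range r).map (zK R n)).sum
def zrank (R p : Nat) : Nat := ((List.range p).filter (fun q => zrail R q = zrail R p)).length
def zchar (tc : List Char) (R p : Nat) : Char :=
  tc.getD (zoff R tc.length (zrail R p) + zrank R p) ' '

lemma zrail_lt (R p : Nat) (hR : 2 ≤ R) : zrail R p < R := by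
  unfold zrail
  have h := Nat.mod_lt p (y := 2*(R-1)) (by omega)
  omega

lemma zrail_eq_iff (R p r : Nat) (hR : 2 ≤ R) (hr : r < R) :
    zrail R p = r ↔ p % (2*(R-1)) = r ∨ p % (2*(R-1)) = 2*(R-1) - r := by
  unfold zrail
  have h := Nat.mod_lt p (y := 2*(R-1)) (by omega)
  omega

lemma zpos_zero (R r : Nat) : zpos R r 0 = r := by
  unfold zpos; split_ifs with h0 h1 <;> simp <;> omega

lemma zpos_succ (R r k : Nat) (hR : 2 ≤ R) (hr : r < R) :
    zpos R r (k+1) = zpos R r k +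
      (if r = 0 then 2*(R-1) else if r = R-1 then 2*(R-1)
       else if k % 2 = 0 then 2*(R-r-1) else 2*r) := by
  by_cases h0 : r = 0
  · subst h0
    unfold zpos
    rw [if_pos rfl, if_pos rfl, if_pos rfl, Nat.succ_mul]
  · by_cases h1 : r = R-1
    · unfold zpos
      rw [if_neg h0, if_neg h0, if_neg h0, if_pos h1, if_pos h1, if_pos h1, Nat.succ_mul,
        Nat.add_assoc]
    · unfold zpos
      rw [if_neg h0, if_neg h0, if_neg h0, if_neg h1, if_neg h1, if_neg h1]
      have hrlt : r < R - 1 := by omega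
      rcases Nat.even_or_odd' k with ⟨q, hq | hq⟩ <;> subst hq
      · have e1 : (2*q) % 2 = 0 := by omega
        have e2 : (2*q)/2 = q := by omega
        have e3 : (2*q+1) % 2 = 1 := by omega
        have e4 : (2*q+1)/2 = q := by omega
        rw [e1, e3, e2, e4, if_pos rfl, if_pos rfl, if_neg (by omega : ¬ (1:Nat) = 0)]
        generalize q*(2*(R-1)) = A
        omega
      · have e1 : (2*q+1) % 2 = 1 := by omega
        have e2 : (2*q+1)/2 = q := by omega
        have e3 : (2*q+1+1) % 2 = 0 := by omega
        have e4 : (2*q+1+1)/2 = q+1 := by omega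
        rw [e1, e3, e2, e4, if_neg (by omega : ¬ (1:Nat) = 0),
          if_neg (by omega : ¬ (1:Nat) = 0), if_pos rfl, Nat.succ_mul]
        generalize q*(2*(R-1)) = A
        omega

lemma zpos_lt_succ (R r k : Nat) (hR : 2 ≤ R) (hr : r < R) :
    zpos R r k < zpos R r (k+1) := by
  rw [zpos_succ R r k hR hr]
  split_ifs <;> omega

lemma zpos_lt_of_lt (R r : Nat) {j k : Nat} (hR : 2 ≤ R) (hr : r < R) (h : j < k) :
    zpos R r j < zpos R r k := by
  obtain ⟨d, rfl⟩ : ∃ d, k = j + d + 1 := ⟨k - j - 1, by omega⟩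
  clear h
  induction d with
  | zero => exact zpos_lt_succ R r j hR hr
  | succ d ih =>
    have h2 := zpos_lt_succ R r (j+d+1) hR hr
    exact lt_trans ih h2

lemma zpos_mono (R r : Nat) {j k : Nat} (hR : 2 ≤ R) (hr : r < R) (h : j ≤ k) :
    zpos R r j ≤ zpos R r k := by
  rcases Nat.lt_or_eq_of_le h with h' | h'
  · exact le_of_lt (zpos_lt_of_lt R r hR hr h')
  · subst h'; exact le_rfl

lemma zpos_le_self (R r k : Nat) (hR : 2 ≤ R) (hr : r < R) : k ≤ zpos R r k := by
  induction k with
  | zero => exact Nat.zero_le _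
  | succ k ih => exact Nat.succ_le_of_lt (lt_of_le_of_lt ih (zpos_lt_succ R r k hR hr))

lemma zrail_zpos (R r k : Nat) (hR : 2 ≤ R) (hr : r < R) : zrail R (zpos R r k) = r := by
  unfold zrail zpos
  by_cases h0 : r = 0
  · subst h0
    rw [if_pos rfl, Nat.mul_mod_left]
    omega
  · by_cases h1 : r = R-1
    · rw [if_neg h0, if_pos h1, Nat.add_mul_mod_self_right, Nat.mod_eq_of_lt (by omega)]
      omega
    · rw [if_neg h0, if_neg h1]
      by_cases he : k % 2 = 0
      · rw [if_pos he, Nat.add_comm (k/2*(2*(R-1))) r, Nat.add_mul_mod_self_right,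
          Nat.mod_eq_of_lt (by omega)]
        omega
      · rw [if_neg he, Nat.add_comm (k/2*(2*(R-1))) (2*(R-1)-r), Nat.add_mul_mod_self_right,
          Nat.mod_eq_of_lt (by omega)]
        omega

lemma zpos_surj (R r p : Nat) (hR : 2 ≤ R) (hr : r < R) (h : zrail R p = r) :
    ∃ k, zpos R r k = p := by
  have hc : 0 < 2*(R-1) := by omega
  have hdm : (p / (2*(R-1))) * (2*(R-1)) + p % (2*(R-1)) = p := by
    have h' := Nat.div_add_mod p (2*(R-1))
    rw [Nat.mul_comm] at h'
    exact h'
  have hmlt : p % (2*(R-1)) < 2*(R-1) := Nat.mod_lt p (by omega)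
  rcases (zrail_eq_iff R p r hR hr).mp h with hm | hm
  · by_cases h0 : r = 0
    · refine ⟨p / (2*(R-1)), ?_⟩
      unfold zpos
      rw [if_pos h0]
      omega
    · by_cases h1 : r = R-1
      · refine ⟨p / (2*(R-1)), ?_⟩
        unfold zpos
        rw [if_neg h0, if_pos h1]
        omega
      · refine ⟨2*(p / (2*(R-1))), ?_⟩
        unfold zpos
        rw [if_neg h0, if_neg h1]
        have e1 : (2*(p/(2*(R-1)))) % 2 = 0 := by omega
        have e2 : (2*(p/(2*(R-1))))/2 = p/(2*(R-1)) := by omega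
        rw [e1, e2, if_pos rfl]
        omega
  · by_cases h0 : r = 0
    · refine ⟨p / (2*(R-1)), ?_⟩
      unfold zpos
      rw [if_pos h0]
      omega
    · by_cases h1 : r = R-1
      · refine ⟨p / (2*(R-1)), ?_⟩
        unfold zpos
        rw [if_neg h0, if_pos h1]
        omega
      · refine ⟨2*(p / (2*(R-1)))+1, ?_⟩
        unfold zpos
        rw [if_neg h0, if_neg h1]
        have e1 : (2*(p/(2*(R-1)))+1) % 2 = 1 := by omega
        have e2 : (2*(p/(2*(R-1)))+1)/2 = p/(2*(R-1)) := by omega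
        rw [e1, e2, if_neg (by omega : ¬ (1:Nat) = 0)]
        omega

lemma zF_mem (R n r p : Nat) : p ∈ zF R n r ↔ p < n ∧ zrail R p = r := by
  simp [zF, List.mem_filter, List.mem_range]

lemma zF_eq_map (R n r : Nat) (hR : 2 ≤ R) (hr : r < R) :
    zF R n r = (List.range (zK R n r)).map (zpos R r) := by
  have hex : ∃ k, n ≤ zpos R r k := ⟨n, zpos_le_self R r n hR hr⟩
  have hlt : ∀ k, k < Nat.find hex → zpos R r k < n := fun k hk =>
    Nat.lt_of_not_le (Nat.find_min hex hk)
  have hge : n ≤ zpos R r (Nat.find hex) := Nat.find_spec hex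
  have hpair1 : List.Pairwise (· < ·) ((List.range (Nat.find hex)).map (zpos R r)) :=
    List.Pairwise.map _ (fun a b h => zpos_lt_of_lt R r hR hr h) List.pairwise_lt_range
  have hpair2 : List.Pairwise (· < ·) (zF R n r) :=
    List.Pairwise.filter _ List.pairwise_lt_range
  have hnd1 : ((List.range (Nat.find hex)).map (zpos R r)).Nodup :=
    (hpair1.imp fun h => Nat.ne_of_lt h)
  have hnd2 : (zF R n r).Nodup := (hpair2.imp fun h => Nat.ne_of_lt h)
  have hmem : ∀ p, p ∈ (List.range (Nat.find hex)).map (zpos R r) ↔ p ∈ zF R n r := by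
    intro p
    rw [zF_mem, List.mem_map]
    constructor
    · rintro ⟨k, hk, rfl⟩
      rw [List.mem_range] at hk
      exact ⟨hlt k hk, zrail_zpos R r k hR hr⟩
    · rintro ⟨hpn, hrail⟩
      obtain ⟨k, rfl⟩ := zpos_surj R r p hR hr hrail
      refine ⟨k, List.mem_range.mpr ?_, rfl⟩
      by_contra hcon
      push_neg at hcon
      exact absurd (le_trans hge (zpos_mono R r hR hr hcon)) (not_le.mpr hpn)
  have hperm : ((List.range (Nat.find hex)).map (zpos R r)).Perm (zF R n r) :=
    List.perm_of_nodup_nodup_toFinset_eq hnd1 hnd2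
      (Finset.ext fun p => by simp only [List.mem_toFinset]; exact hmem p)
  have heq : (List.range (Nat.find hex)).map (zpos R r) = zF R n r :=
    List.eq_of_perm_of_sorted (fun a b _ _ h1 h2 => by omega) hpair1 hpair2 hperm
  have hlen : zK R n r = Nat.find hex := by
    simp only [zK, ← heq, List.length_map, List.length_range]
  rw [hlen, ← heq]

lemma zpos_lt_n (R n r k : Nat) (hR : 2 ≤ R) (hr : r < R) (hk : k < zK R n r) :
    zpos R r k < n := by
  have hmem : zpos R r k ∈ zF R n r := by
    rw [zF_eq_map R n r hR hr, List.mem_map]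
    exact ⟨k, List.mem_range.mpr hk, rfl⟩
  exact ((zF_mem R n r _).mp hmem).1

lemma lt_zK_of_lt_n (R n r k : Nat) (hR : 2 ≤ R) (hr : r < R) (h : zpos R r k < n) :
    k < zK R n r := by
  by_contra hc
  push_neg at hc
  have hmem : zpos R r k ∈ zF R n r :=
    (zF_mem R n r _).mpr ⟨h, zrail_zpos R r k hR hr⟩
  rw [zF_eq_map R n r hR hr, List.mem_map] at hmem
  obtain ⟨k', hk', he⟩ := hmem
  rw [List.mem_range] at hk'
  exact absurd he (Nat.ne_of_lt (zpos_lt_of_lt R r hR hr (lt_of_lt_of_le hk' hc)))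

lemma zrank_spec (R n p : Nat) (hR : 2 ≤ R) (hp : p < n) :
    zrank R p < zK R n (zrail R p) ∧ zpos R (zrail R p) (zrank R p) = p := by
  have hr : zrail R p < R := zrail_lt R p hR
  obtain ⟨m, hm⟩ : ∃ m, n - p = m + 1 := ⟨n - p - 1, by omega⟩
  have h1 : zF R n (zrail R p) =
      ((List.range p).filter (fun q => zrail R q = zrail R p)) ++
      ((List.range (m+1)).map (fun x => p + x)).filter (fun q => zrail R q = zrail R p) := by
    rw [zF, show n = p + (m+1) by omega, List.range_add, List.filter_append]
  obtain ⟨tail, h2⟩ : ∃ tail,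
      ((List.range (m+1)).map (fun x => p + x)).filter (fun q => zrail R q = zrail R p)
        = p :: tail := by
    rw [List.range_succ_eq_map, List.map_cons, List.filter_cons]
    simp only [Nat.add_zero]
    rw [if_pos (by simp)]
    exact ⟨_, rfl⟩
  rw [h2] at h1
  have hlen : zrank R p < (zF R n (zrail R p)).length := by
    rw [h1, List.length_append, List.length_cons, zrank]
    omega
  have hget : (zF R n (zrail R p))[zrank R p]? = some p := by
    rw [h1, List.getElem?_append_right (by rw [zrank])]
    rw [zrank]
    simp
  rw [zF_eq_map R n (zrail R p) hR hr] at hget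
  have hklt : zrank R p < zK R n (zrail R p) := hlen
  refine ⟨hklt, ?_⟩
  rw [List.getElem?_eq_getElem (by simpa using hklt)] at hget
  simp only [List.getElem_map, List.getElem_range] at hget
  exact Option.some.inj hget

-- ===== A-side loop characterization =====

def zwrite (tc : List Char) (R r t0 : Nat) : Nat → Nat → List (List Char) → List (List Char)
  | _, 0, row => row
  | k, m+1, row => zwrite tc R r t0 (k+1) m (row.set (zpos R r k) [tc.getD (t0+k) ' '])

lemma zwrite_getD_of_ne (tc : List Char) (R r t0 : Nat) :
    ∀ m k row p, (∀ j, k ≤ j → j < k + m → zpos R r j ≠ p) →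
      (zwrite tc R r t0 k m row).getD p [] = row.getD p [] := by
  intro m
  induction m with
  | zero => intro k row p _; rfl
  | succ m ih =>
    intro k row p h
    rw [zwrite, ih _ _ _ (fun j hj1 hj2 => h j (by omega) (by omega))]
    simp only [List.getD_eq_getElem?_getD]
    rw [List.getElem?_set_ne (h k le_rfl (by omega))]

lemma zwrite_getD_hit (tc : List Char) (R r t0 : Nat) (hR : 2 ≤ R) (hr : r < R) :
    ∀ m k row j pcol, k ≤ j → j < k + m → zpos R r j = pcol → pcol < row.length →
      (zwrite tc R r t0 k m row).getD pcol [] = [tc.getD (t0+j) ' '] := by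
  intro m
  induction m with
  | zero => intro k row j pcol h1 h2; omega
  | succ m ih =>
    intro k row j pcol h1 h2 hpc h3
    by_cases hjk : j = k
    · subst hjk
      subst hpc
      rw [zwrite, zwrite_getD_of_ne _ _ _ _ _ _ _ _
        (fun j' hj1 hj2 => Nat.ne_of_gt (zpos_lt_of_lt R r hR hr (by omega)))]
      simp only [List.getD_eq_getElem?_getD]
      rw [List.getElem?_set_self (by simpa using h3)]
      rfl
    · rw [zwrite]
      exact ih (k+1) _ j pcol (by omega) (by omega) hpc (by simpa using h3)

lemma pvA_while_eq (tc : List Char) (R r t0 : Nat) (hR : 2 ≤ R) (hr : r < R) :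
    ∀ fuel k (row : List (List Char)) ili,
      (2*(R-r-1) = 0 ∨ 2*r = 0 → ili = (if 2*(R-r-1) = 0 then 1 else 0)) →
      k ≤ zK R tc.length r →
      tc.length + 1 ≤ fuel + zpos R r k →
      pvA_while tc tc.length (2*(R-r-1)) (2*r) fuel row (zpos R r k) (t0+k) t0 ili
        = (zwrite tc R r t0 k (zK R tc.length r - k) row, t0 + zK R tc.length r) := by
  intro fuel
  induction fuel with
  | zero =>
    intro k row ili hili hk hf
    have hkK : k = zK R tc.length r := by
      by_contra hc
      have : zpos R r k < tc.length := zpos_lt_n R tc.length r k hR hr (by omega)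
      omega
    rw [pvA_while, hkK, Nat.sub_self, zwrite]
  | succ fuel ih =>
    intro k row ili hili hk hf
    rw [pvA_while]
    by_cases hlt : zpos R r k < tc.length
    · have hkK : k < zK R tc.length r := lt_zK_of_lt_n R tc.length r k hR hr hlt
      rw [if_pos hlt]
      simp only []
      have hsub : t0 + k - t0 = k := by omega
      -- the new ili and the new inlist
      by_cases hmid : 2*(R-r-1) ≠ 0 ∧ 2*r ≠ 0
      · rw [if_pos hmid, hsub]
        have hstep : zpos R r k + (if k % 2 = 0 then 2*(R-r-1) else 2*r) = zpos R r (k+1) := by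
          rw [zpos_succ R r k hR hr]
          have h0 : ¬ r = 0 := by omega
          have h1 : ¬ r = R-1 := by omega
          rw [if_neg h0, if_neg h1]
        have hili2 : (2*(R-r-1) = 0 ∨ 2*r = 0 → (k % 2) = (if 2*(R-r-1) = 0 then 1 else 0)) := by
          intro hc; exact absurd hc (by omega)
        have hnext := ih (k+1) (row.set (zpos R r k) [tc.getD (t0+k) ' ']) (k % 2) hili2
          (by omega) (by have := zpos_lt_succ R r k hR hr; omega)
        rw [show t0 + k + 1 = t0 + (k+1) by omega, hstep, hnext]
        congr 1
        obtain ⟨d, hd⟩ : ∃ d, zK R tc.length r - k = d + 1 := ⟨zK R tc.length r - k - 1, by omega⟩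
        rw [hd, zwrite, show zK R tc.length r - (k+1) = d by omega]
      · rw [if_neg hmid]
        have hili0 : ili = (if 2*(R-r-1) = 0 then 1 else 0) := by
          apply hili; omega
        have hstep : zpos R r k + (if ili = 0 then 2*(R-r-1) else 2*r) = zpos R r (k+1) := by
          rw [zpos_succ R r k hR hr, hili0]
          by_cases h0 : r = 0
          · subst h0
            rw [if_pos rfl, if_neg (by omega : ¬ 2*(R-0-1) = 0), if_pos rfl]
            omega
          · have h1 : r = R - 1 := by omega
            rw [if_neg h0, if_pos h1, if_pos (by omega : 2*(R-r-1) = 0),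
              if_neg (by omega : ¬ (1:Nat) = 0)]
            omega
        have hnext := ih (k+1) (row.set (zpos R r k) [tc.getD (t0+k) ' ']) ili hili
          (by omega) (by have := zpos_lt_succ R r k hR hr; omega)
        rw [show t0 + k + 1 = t0 + (k+1) by omega, hstep, hnext]
        congr 1
        obtain ⟨d, hd⟩ : ∃ d, zK R tc.length r - k = d + 1 := ⟨zK R tc.length r - k - 1, by omega⟩
        rw [hd, zwrite, show zK R tc.length r - (k+1) = d by omega]
    · rw [if_neg hlt]
      have hkK : k = zK R tc.length r := by
        by_contra hc
        have : zpos R r k < tc.length := zpos_lt_n R tc.length r k hR hr (by omega)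
        omega
      rw [hkK, Nat.sub_self, zwrite]

-- the finished grid: rails below r are filled, rails from r on still blank
def zrow (tc : List Char) (R r : Nat) : List (List Char) :=
  zwrite tc R r (zoff R tc.length r) 0 (zK R tc.length r) (List.replicate tc.length [])

def zgrid (tc : List Char) (R r : Nat) : List (List (List Char)) :=
  (List.range R).map (fun r' => if r' < r then zrow tc R r' else List.replicate tc.length [])

lemma zoff_succ (R n r : Nat) : zoff R n (r+1) = zoff R n r + zK R n r := by
  rw [zoff, List.range_succ, List.map_append, List.sum_append, zoff]
  simp

lemma pvA_rails_eq (tc : List Char) (R : Nat) (hR : 2 ≤ R) :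
    pvA_rails tc tc.length R = (zgrid tc R R, zoff R tc.length R, zoff R tc.length R) := by
  suffices h : ∀ r ≤ R, (List.range r).foldl
      (fun st r =>
        let s0 := 2 * (R - r - 1)
        let s1 := 2 * r
        let ili := if s0 = 0 then 1 else 0
        let res := pvA_while tc tc.length s0 s1 (tc.length+1) (st.1.getD r []) r st.2.1 st.2.2 ili
        (st.1.set r res.1, res.2, res.2))
      (List.replicate R (List.replicate tc.length []), 0, 0)
      = (zgrid tc R r, zoff R tc.length r, zoff R tc.length r) by
    exact h R le_rfl
  intro r
  induction r with
  | zero =>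
    intro _
    simp only [List.range_zero, List.foldl_nil, zgrid]
    rw [show (fun (r' : Nat) => if r' < 0 then zrow tc R r' else List.replicate tc.length ([] : List Char)) = (fun _ => List.replicate tc.length []) from funext (fun r' => by simp),
      List.map_const', List.length_range]
    have hz : zoff R tc.length 0 = 0 := by simp [zoff]
    rw [hz]
  | succ r ih =>
    intro hrR
    have hr : r < R := by omega
    rw [List.range_succ, List.foldl_append, ih (by omega), List.foldl_cons, List.foldl_nil]
    simp only []
    have hrow : (zgrid tc R r).getD r [] = List.replicate tc.length [] := by
      rw [List.getD_eq_getElem _ _ (by simp [zgrid]; omega)]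
      simp only [zgrid, List.getElem_map, List.getElem_range]
      rw [if_neg (by omega)]
    rw [hrow]
    have hwhile := pvA_while_eq tc R r (zoff R tc.length r) hR hr (tc.length+1) 0
      (List.replicate tc.length []) (if 2*(R-r-1) = 0 then 1 else 0)
      (fun _ => rfl) (Nat.zero_le _) (by omega)
    rw [zpos_zero] at hwhile
    rw [show zoff R tc.length r + 0 = zoff R tc.length r by omega] at hwhile
    rw [Nat.sub_zero] at hwhile
    rw [hwhile]
    simp only []
    rw [zoff_succ]
    congr 1
    · -- grid set
      apply List.ext_getElem
      · simp [zgrid]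
      · intro i h1 h2
        simp only [zgrid, List.length_set, List.length_map, List.length_range] at h1 h2
        by_cases hir : i = r
        · subst hir
          rw [List.getElem_set_self (by simp [zgrid]; omega)]
          simp only [zgrid, List.getElem_map, List.getElem_range]
          rw [if_pos (by omega)]
          rfl
        · rw [List.getElem_set_ne (by omega)]
          simp only [zgrid, List.getElem_map, List.getElem_range]
          by_cases hlt : i < r
          · rw [if_pos hlt, if_pos (by omega)]
          · rw [if_neg hlt, if_neg (by omega)]

lemma zgrid_cell (tc : List Char) (R r p : Nat) (hR : 2 ≤ R) (hr : r < R) :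
    ((zgrid tc R R).getD r []).getD p [] =
      if p < tc.length ∧ zrail R p = r
      then [tc.getD (zoff R tc.length r + zrank R p) ' '] else [] := by
  have hrowr : (zgrid tc R R).getD r [] = zrow tc R r := by
    rw [List.getD_eq_getElem _ _ (by simp [zgrid]; omega)]
    simp only [zgrid, List.getElem_map, List.getElem_range]
    rw [if_pos hr]
  rw [hrowr, zrow]
  by_cases hc : p < tc.length ∧ zrail R p = r
  · rw [if_pos hc]
    obtain ⟨hpn, hrail⟩ := hc
    obtain ⟨hrk, hzp⟩ := zrank_spec R tc.length p hR hpn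
    rw [hrail] at hrk hzp
    exact zwrite_getD_hit tc R r (zoff R tc.length r) hR hr _ 0 _ (zrank R p) p
      (Nat.zero_le _) (by omega) hzp (by rw [List.length_replicate]; exact hpn)
  · rw [if_neg hc]
    rw [zwrite_getD_of_ne]
    · rw [List.getD_eq_getElem?_getD]
      by_cases hpn : p < tc.length
      · rw [List.getElem?_eq_getElem (by simpa using hpn)]
        simp
      · rw [List.getElem?_eq_none (by simpa using hpn)]
        rfl
    · intro j hj1 hj2 he
      apply hc
      rw [← he]
      exact ⟨zpos_lt_n R tc.length r j hR hr (by omega), zrail_zpos R r j hR hr⟩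

lemma flatMap_congr' {α β : Type} (l : List α) (f g : α → List β)
    (h : ∀ a ∈ l, f a = g a) : l.flatMap f = l.flatMap g := by
  induction l with
  | nil => rfl
  | cons a l ih =>
    rw [List.flatMap_cons, List.flatMap_cons, h a (by simp),
      ih (fun x hx => h x (by simp [hx]))]

lemma flatMap_ite_single {α : Type} (x : List α) :
    ∀ (R r0 : Nat), r0 < R →
      (List.range R).flatMap (fun r => if r = r0 then x else []) = x := by
  intro R
  induction R with
  | zero => intro r0 h; omega
  | succ R ih =>
    intro r0 h
    rw [List.range_succ, List.flatMap_append]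
    by_cases he : r0 = R
    · subst he
      have h1 : (List.range r0).flatMap (fun r => if r = r0 then x else []) = [] := by
        rw [List.flatMap_eq_nil_iff]
        intro r hr
        rw [if_neg (by rw [List.mem_range] at hr; omega)]
      rw [h1]
      simp
    · rw [ih r0 (by omega)]
      simp [Ne.symm he]

-- A's output is the per-column character list
lemma portA_chars (tc : List Char) (R : Nat) (hR : 2 ≤ R) :
    ((List.range tc.length).foldl
      (fun acc p => (List.range R).foldl
        (fun acc2 r => acc2 ++ (((pvA_rails tc tc.length R).1.getD r []).getD p [])) acc) [])
    = (List.range tc.length).map (zchar tc R) := by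
  rw [pvA_rails_eq tc R hR]
  simp only []
  have hinner : ∀ (acc : List Char) (p : Nat), p < tc.length →
      (List.range R).foldl (fun acc2 r => acc2 ++ (((zgrid tc R R).getD r []).getD p [])) acc
        = acc ++ [zchar tc R p] := by
    intro acc p hp
    rw [PySem.List.foldl_append_eq_flatMap]
    congr 1
    have hcell : ∀ r ∈ List.range R,
        ((zgrid tc R R).getD r []).getD p [] =
          (if r = zrail R p then [zchar tc R p] else []) := by
      intro r hrm
      rw [List.mem_range] at hrm
      rw [zgrid_cell tc R r p hR hrm]
      by_cases he : r = zrail R p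
      · rw [if_pos ⟨hp, he.symm⟩, if_pos he, zchar, he]
      · rw [if_neg (fun hx => he hx.2.symm), if_neg he]
    rw [flatMap_congr' (List.range R) _ (fun r => if r = zrail R p then [zchar tc R p] else []) hcell]
    exact flatMap_ite_single _ R (zrail R p) (zrail_lt R p hR)
  have : ∀ (ps : List Nat) (acc : List Char), (∀ p ∈ ps, p < tc.length) →
      ps.foldl (fun acc p => (List.range R).foldl
        (fun acc2 r => acc2 ++ (((zgrid tc R R).getD r []).getD p [])) acc) acc
      = acc ++ ps.map (zchar tc R) := by
    intro ps
    induction ps with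
    | nil => intro acc _; simp
    | cons p ps ih =>
      intro acc hmem
      rw [List.foldl_cons, hinner acc p (hmem p (by simp)),
        ih _ (fun q hq => hmem q (by simp [hq])), List.map_cons]
      simp
  rw [this (List.range tc.length) [] (fun p hp => List.mem_range.mp hp)]
  simp

-- ===== B-side characterization =====

lemma zcounts_getD (l : List Nat) :
    ∀ (cs : List Nat), (∀ x ∈ l, x < cs.length) →
      (l.foldl (fun cs r => cs.set r (cs.getD r 0 + 1)) cs).length = cs.length ∧
      ∀ i, i < cs.length →
        (l.foldl (fun cs r => cs.set r (cs.getD r 0 + 1)) cs).getD i 0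
          = cs.getD i 0 + l.countP (fun x => x = i) := by
  induction l with
  | nil => intro cs _; exact ⟨rfl, fun i _ => by simp⟩
  | cons a l ih =>
    intro cs hmem
    have ha : a < cs.length := hmem a (by simp)
    obtain ⟨hlen, hgd⟩ := ih (cs.set a (cs.getD a 0 + 1))
      (fun x hx => by rw [List.length_set]; exact hmem x (by simp [hx]))
    refine ⟨by rw [List.foldl_cons, hlen, List.length_set], ?_⟩
    intro i hi
    rw [List.foldl_cons, hgd i (by rwa [List.length_set]), List.countP_cons]
    by_cases he : a = i
    · subst he
      rw [List.getD_eq_getElem?_getD, List.getElem?_set_self ha]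
      simp [List.getD_eq_getElem?_getD]
      omega
    · rw [List.getD_eq_getElem?_getD, List.getElem?_set_ne he, ← List.getD_eq_getElem?_getD]
      simp [he]

lemma zcounts_eq (tc : List Char) (R : Nat) (hR : 2 ≤ R) :
    (((List.range tc.length).map (zrail R)).foldl
        (fun cs r => cs.set r (cs.getD r 0 + 1)) (List.replicate R 0))
      = (List.range R).map (zK R tc.length) := by
  obtain ⟨hlen, hgd⟩ := zcounts_getD ((List.range tc.length).map (zrail R)) (List.replicate R 0)
    (fun x hx => by
      rw [List.mem_map] at hx
      obtain ⟨p, _, rfl⟩ := hx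
      rw [List.length_replicate]
      exact zrail_lt R p hR)
  apply List.ext_getElem
  · rw [hlen]; simp
  · intro i h1 h2
    rw [List.length_map, List.length_range] at h2
    rw [← List.getD_eq_getElem _ 0, hgd i (by simpa using h2)]
    simp only [List.getElem_map, List.getElem_range]
    rw [List.getD_replicate _ (by simpa using h2)]
    rw [List.countP_map]
    rw [zK, zF, List.countP_eq_length_filter]
    simp [Function.comp_def]

def zslices (tc : List Char) : Nat → List Nat → List (List Char)
  | _, [] => []
  | pos, cnt :: cs => (tc.drop pos).take cnt :: zslices tc (pos+cnt) cs

lemma zslices_foldl (tc : List Char) (cnts : List Nat) :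
    ∀ (acc : List (List Char)) (pos : Nat),
      (cnts.foldl (fun (st : List (List Char) × Nat) cnt =>
        (st.1 ++ [(tc.drop st.2).take cnt], st.2 + cnt)) (acc, pos)).1
      = acc ++ zslices tc pos cnts := by
  induction cnts with
  | nil => intro acc pos; simp [zslices]
  | cons cnt cs ih =>
    intro acc pos
    rw [List.foldl_cons]
    simp only []
    rw [ih, zslices]
    simp

lemma zslices_getD (tc : List Char) (cnts : List Nat) :
    ∀ (i pos : Nat), i < cnts.length →
      (zslices tc pos cnts).getD i [] =
        (tc.drop (pos + (cnts.take i).sum)).take (cnts.getD i 0) := by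
  induction cnts with
  | nil => intro i pos h; simp at h
  | cons cnt cs ih =>
    intro i pos h
    cases i with
    | zero => simp [zslices]
    | succ i =>
      rw [zslices]
      have : (cnt :: cs).getD (i+1) 0 = cs.getD i 0 := rfl
      rw [this]
      have h2 : ((cnt :: cs).take (i+1)).sum = cnt + (cs.take i).sum := by
        simp [List.take_succ_cons]
      rw [h2]
      have h3 : (((tc.drop pos).take cnt :: zslices tc (pos+cnt) cs)).getD (i+1) [] = (zslices tc (pos+cnt) cs).getD i [] := rfl
      rw [h3, ih i (pos+cnt) (by simpa using h)]
      congr 2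
      omega

def zweave (rails : List (List Char)) : List Nat → List Nat → List Char
  | [], _ => []
  | r :: l', idxs =>
    (rails.getD r []).getD (idxs.getD r 0) ' ' ::
      zweave rails l' (idxs.set r (idxs.getD r 0 + 1))

lemma zweave_foldl (rails : List (List Char)) (l : List Nat) :
    ∀ (idxs : List Nat) (out : List Char),
      (l.foldl (fun (st : List Nat × List Char) r =>
        (st.1.set r (st.1.getD r 0 + 1),
         st.2 ++ [(rails.getD r []).getD (st.1.getD r 0) ' '])) (idxs, out)).2
      = out ++ zweave rails l idxs := by
  induction l with
  | nil => intro idxs out; simp [zweave]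
  | cons r l' ih =>
    intro idxs out
    rw [List.foldl_cons]
    simp only []
    rw [ih, zweave]
    simp

lemma zweave_spec (tc : List Char) (R : Nat) (hR : 2 ≤ R) :
    ∀ (m p : Nat) (idxs : List Nat), p + m = tc.length → idxs.length = R →
      (∀ i, i < R → idxs.getD i 0 = (List.range p).countP (fun q => zrail R q = i)) →
      zweave (zslices tc 0 ((List.range R).map (zK R tc.length)))
        ((List.range' p m).map (zrail R)) idxs
      = (List.range' p m).map (zchar tc R) := by
  intro m
  induction m with
  | zero => intro p idxs _ _ _; simp [zweave]
  | succ m ih =>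
    intro p idxs hpm hlen hinv
    have hp : p < tc.length := by omega
    have hr : zrail R p < R := zrail_lt R p hR
    rw [List.range'_succ, List.map_cons, List.map_cons, zweave]
    have hidx : idxs.getD (zrail R p) 0 = zrank R p := by
      rw [hinv (zrail R p) hr, zrank, List.countP_eq_length_filter]
    obtain ⟨hrk, hzp⟩ := zrank_spec R tc.length p hR hp
    have hslice : ((zslices tc 0 ((List.range R).map (zK R tc.length))).getD (zrail R p) []) =
        (tc.drop (zoff R tc.length (zrail R p))).take (zK R tc.length (zrail R p)) := by
      rw [zslices_getD tc _ (zrail R p) 0 (by simpa using hr)]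
      have hcnt : (List.map (zK R tc.length) (List.range R)).getD (zrail R p) 0
          = zK R tc.length (zrail R p) := by
        rw [List.getD_eq_getElem _ _ (by simpa using hr)]
        simp
      have hsum : ((List.map (zK R tc.length) (List.range R)).take (zrail R p)).sum
          = zoff R tc.length (zrail R p) := by
        rw [← List.map_take, List.take_range, Nat.min_eq_left (le_of_lt hr)]
        rfl
      rw [hcnt, hsum, Nat.zero_add]
    have hchar : ((zslices tc 0 ((List.range R).map (zK R tc.length))).getD (zrail R p) []).getD
        (idxs.getD (zrail R p) 0) ' ' = zchar tc R p := by
      rw [hslice, hidx, zchar]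
      rw [List.getD_eq_getElem?_getD, List.getElem?_take, if_pos hrk, List.getElem?_drop,
        ← List.getD_eq_getElem?_getD]
    rw [hchar]
    congr 1
    apply ih (p+1)
    · omega
    · rw [List.length_set]; exact hlen
    · intro i hi
      rw [show List.range (p+1) = List.range p ++ [p] from List.range_succ, List.countP_append]
      by_cases he : zrail R p = i
      · subst he
        rw [List.getD_eq_getElem?_getD, List.getElem?_set_self (by rw [hlen]; exact hr),
          Option.getD_some, hidx]
        have hc1 : List.countP (fun q => decide (zrail R q = zrail R p)) [p] = 1 := by
          simp
        rw [hc1, zrank, List.countP_eq_length_filter]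
      · rw [List.getD_eq_getElem?_getD, List.getElem?_set_ne he, ← List.getD_eq_getElem?_getD,
          hinv i hi]
        have hc0 : List.countP (fun q => decide (zrail R q = i)) [p] = 0 := by
          simp [he]
        rw [hc0]
        omega

-- ===== VERDICT helper and proof =====

theorem rail_fence_cipher_decoding_spec : Claim_equal_rail_fence_cipher_decoding := by
  unfold Claim_equal_rail_fence_cipher_decoding
  intro text number_of_rails _ hPre
  unfold Pre_rail_fence_cipher_decoding at hPre
  unfold Spec_rail_fence_cipher_decoding
  unfold rail_fence_cipher_decoding rail_fence_cipher_decoding_alt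
  have hnot : ¬ number_of_rails < 2 := by omega
  rw [if_neg hnot, if_neg hnot]
  set tc := PySem.Chars.upper text.toList with htc
  set R := number_of_rails.toNat with hRdef
  have hR : 2 ≤ R := by omega
  -- A side
  have hA := portA_chars tc R hR
  simp only [] at hA ⊢
  rw [hA]
  -- B side
  have hpat : (List.range tc.length).map (fun p => min (p % (2*(R-1))) ((2*(R-1)) - p % (2*(R-1))))
      = (List.range tc.length).map (zrail R) := rfl
  rw [hpat, zcounts_eq tc R hR, zslices_foldl, zweave_foldl]
  rw [List.nil_append, List.nil_append]
  have hw := zweave_spec tc R hR tc.length 0 (List.replicate R 0) (by omega) (by simp)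
    (fun i hi => by simp)
  rw [show (List.range' 0 tc.length) = List.range tc.length from (List.range_eq_range').symm] at hw
  rw [hw]
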